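-- pv_equiv track=rewrite | github.com/fkrynitzky/bsr-git | python3/lunar_arthmetic.py | adding
-- ===== SOURCE A (Python) =====
-- def adding(x,y):
--     if(len(y) > len(x)):
--         x,y = y,x
--     anwser = ""
--     reverse_x = x[::-1]
--     reverse_y = y[::-1]
--     for z in range(0,len(y)):
--         if(int(reverse_x[z]) > int(reverse_y[z])):
--             anwser += reverse_x[z]
--         else: anwser += reverse_y[z]
--     for z in range(len(y),len(x)):
--         anwser += reverse_x[z]
--     return ''.join(reversed(anwser))
-- ===== SOURCE B (Python) =====
-- def adding(x, y):
--     if len(y) > len(x):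
--         x, y = y, x
--     pad = len(x) - len(y)
--     return x[:pad] + ''.join(max(b, a, key=int) for a, b in zip(x[pad:], y))
-- ===== Notes on version B (the rewrite author's own statement) =====
-- stated objective: idiomatic
-- what changed: B builds the result most-significant-first in one expression: slice the longer operand's high prefix raw, then zip the overlapping tails and join the key=int maxima, dropping A's two reversals, index loops, accumulator and final re-reverse.
import Mathlib
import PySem

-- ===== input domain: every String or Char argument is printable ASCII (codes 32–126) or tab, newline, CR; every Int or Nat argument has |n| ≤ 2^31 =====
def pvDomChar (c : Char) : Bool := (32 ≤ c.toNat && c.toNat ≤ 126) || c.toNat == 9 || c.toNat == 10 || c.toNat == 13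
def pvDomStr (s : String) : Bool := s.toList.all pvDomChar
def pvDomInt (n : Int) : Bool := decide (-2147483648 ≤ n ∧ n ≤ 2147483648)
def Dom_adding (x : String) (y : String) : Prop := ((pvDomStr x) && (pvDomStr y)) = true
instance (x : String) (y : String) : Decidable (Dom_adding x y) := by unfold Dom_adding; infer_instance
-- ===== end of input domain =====

-- B builds the answer most-significant-first in one expression (raw high prefix ++ zipped
-- digit-max of the tails) instead of A's reverse / two index loops / re-reverse; objective:
-- idiomatic. Return values only (no mutation).

-- ===== PORT A =====
-- int(c) for a one-character string (ValueError = none)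
def pvInt? (c : Char) : Option Int := PySem.Int.ofStr? (String.mk [c])

-- A's two index loops over the reversed strings: while the (reversed) shorter operand
-- remains, compare int values; when it is exhausted, copy the rest of reverse_x raw.
def addingLoop : List Char → List Char → Option (List Char)
  | xs, [] => some xs
  | [], _ :: _ => none   -- unreachable: x is at least as long as y
  | a :: xs, b :: ys =>
    match pvInt? a, pvInt? b with
    | some ia, some ib => (addingLoop xs ys).map (fun r => (if ia > ib then a else b) :: r)
    | _, _ => none       -- ValueError: excluded by Pre_adding

def adding (x : String) (y : String) : String :=
  let p := if y.length > x.length then (y, x) else (x, y)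
  match addingLoop p.1.toList.reverse p.2.toList.reverse with
  | some ans => String.mk ans.reverse
  | none => ""           -- ValueError: excluded by Pre_adding

-- ===== PORT B =====
-- int(c), defaulting where int() would raise ValueError — those inputs are excluded by
-- Pre_adding (B's Python raises there too), so the default is never compared on Pre_.
def pvIntD (c : Char) : Int := (pvInt? c).getD 0

-- max(b, a, key=int): b if int(b) >= int(a) else a, i.e. a exactly when int(a) > int(b)
def pvMaxBA (a b : Char) : Char := if pvIntD a > pvIntD b then a else b

def adding_alt (x : String) (y : String) : String :=
  let p := if y.length > x.length then (y, x) else (x, y)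
  let xs := p.1.toList
  let ys := p.2.toList
  let pad := xs.length - ys.length
  String.mk (xs.take pad ++ List.zipWith pvMaxBA (xs.drop pad) ys)

-- ===== PRECONDITION & SPEC =====
def pvIntOk (c : Char) : Bool := (pvInt? c).isSome

-- Pre_ excludes exactly the inputs where A raises ValueError: some character in the
-- overlapping low-order region of the two operands is not accepted by int().
def Pre_adding (x : String) (y : String) : Prop :=
  let p := if y.length > x.length then (y, x) else (x, y)
  (((p.1.toList.drop (p.1.toList.length - p.2.toList.length)).all pvIntOk)
    && p.2.toList.all pvIntOk) = true
instance (x : String) (y : String) : Decidable (Pre_adding x y) := by unfold Pre_adding; infer_instance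

def pvWitness_adding : String × String := ("12", "9")

def Spec_adding (x : String) (y : String) (out : String) : Prop := out = adding_alt x y
instance (x : String) (y : String) (out : String) : Decidable (Spec_adding x y out) := by unfold Spec_adding; infer_instance

-- ===== CLAIM (what is proved, stated in full; the proofs are below) =====
def Claim_equal_adding : Prop := ∀ (x : String) (y : String), Dom_adding x y → Pre_adding x y → Spec_adding x y (adding x y)

-- ===== LEMMAS AND PROOFS =====

-- the pure digit-wise max used to characterise A's loop
def pvMaxC (a b : Char) : Char :=
  match pvInt? a, pvInt? b with
  | some ia, some ib => if ia > ib then a else b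
  | _, _ => a

def zipMax : List Char → List Char → List Char
  | a :: xs, b :: ys => pvMaxC a b :: zipMax xs ys
  | _, _ => []

theorem zipMax_nil_right (xs : List Char) : zipMax xs [] = [] := by
  cases xs <;> rfl

-- B's zipWith agrees with zipMax when every compared character is int-accepted
theorem zipWith_eq_zipMax (xs ys : List Char) (hx : xs.all pvIntOk = true)
    (hy : ys.all pvIntOk = true) : List.zipWith pvMaxBA xs ys = zipMax xs ys := by
  induction xs generalizing ys with
  | nil => cases ys <;> rfl
  | cons a xs ih =>
    cases ys with
    | nil => rfl
    | cons b ys =>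
      simp only [List.all_cons, Bool.and_eq_true, pvIntOk, Option.isSome_iff_exists] at hx hy
      obtain ⟨⟨ia, ha⟩, hx⟩ := hx
      obtain ⟨⟨ib, hb⟩, hy⟩ := hy
      simp [List.zipWith, zipMax, pvMaxBA, pvMaxC, pvIntD, ha, hb, ih ys hx hy]

theorem addingLoop_eq (ys xs : List Char) (hlen : ys.length ≤ xs.length)
    (hx : (xs.take ys.length).all pvIntOk = true) (hy : ys.all pvIntOk = true) :
    addingLoop xs ys = some (zipMax xs ys ++ xs.drop ys.length) := by
  induction ys generalizing xs with
  | nil => simp [addingLoop, zipMax_nil_right]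
  | cons b ys ih =>
    cases xs with
    | nil => simp at hlen
    | cons a xs =>
      simp only [List.length_cons, List.take_succ_cons, List.all_cons, Bool.and_eq_true,
        pvIntOk, Option.isSome_iff_exists] at hx hy
      obtain ⟨⟨ia, ha⟩, hx⟩ := hx
      obtain ⟨⟨ib, hb⟩, hy⟩ := hy
      have hlen' : ys.length ≤ xs.length := by simpa using hlen
      simp [addingLoop, ha, hb, zipMax, pvMaxC, ih xs hlen' hx hy]

theorem zipMax_truncl (xs ys : List Char) : zipMax xs ys = zipMax (xs.take ys.length) ys := by
  induction xs generalizing ys with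
  | nil => simp
  | cons a xs ih =>
    cases ys with
    | nil => simp [zipMax_nil_right]
    | cons b ys => simp [zipMax, ih ys]

theorem zipMax_append (xs ys : List Char) (a b : Char) (h : xs.length = ys.length) :
    zipMax (xs ++ [a]) (ys ++ [b]) = zipMax xs ys ++ [pvMaxC a b] := by
  induction xs generalizing ys with
  | nil =>
    cases ys with
    | nil => rfl
    | cons _ _ => simp at h
  | cons c xs ih =>
    cases ys with
    | nil => simp at h
    | cons d ys =>
      simp only [List.length_cons, Nat.succ_inj] at h
      simp [zipMax, ih ys h]

theorem zipMax_reverse (xs ys : List Char) (h : xs.length = ys.length) :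
    zipMax xs.reverse ys.reverse = (zipMax xs ys).reverse := by
  induction xs generalizing ys with
  | nil =>
    cases ys with
    | nil => rfl
    | cons _ _ => simp at h
  | cons a xs ih =>
    cases ys with
    | nil => simp at h
    | cons b ys =>
      simp only [List.length_cons, Nat.succ_inj] at h
      have hl : xs.reverse.length = ys.reverse.length := by simp [h]
      simp [List.reverse_cons, zipMax_append _ _ _ _ hl, zipMax, ih ys h]

-- the ordered-pair core: both ports compute the same string
theorem core (xs ys : List Char) (hlen : ys.length ≤ xs.length)
    (h1 : (xs.drop (xs.length - ys.length)).all pvIntOk = true)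
    (h2 : ys.all pvIntOk = true) :
    (match addingLoop xs.reverse ys.reverse with
     | some ans => String.mk ans.reverse
     | none => "")
    = String.mk (xs.take (xs.length - ys.length)
        ++ List.zipWith pvMaxBA (xs.drop (xs.length - ys.length)) ys) := by
  have hdl : (xs.drop (xs.length - ys.length)).length = ys.length := by
    rw [List.length_drop]; omega
  have htr : xs.reverse.take ys.length = (xs.drop (xs.length - ys.length)).reverse := by
    rw [List.take_reverse]
  have hdr : xs.reverse.drop ys.length = (xs.take (xs.length - ys.length)).reverse := by
    rw [List.drop_reverse]
  have hx' : ((xs.reverse).take ys.reverse.length).all pvIntOk = true := by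
    rw [List.length_reverse, htr, List.all_reverse]; exact h1
  rw [addingLoop_eq ys.reverse xs.reverse (by simp [hlen]) hx' (by rwa [List.all_reverse])]
  rw [zipWith_eq_zipMax _ _ h1 h2]
  simp only [List.length_reverse]
  rw [zipMax_truncl xs.reverse ys.reverse, List.length_reverse, htr, hdr,
    zipMax_reverse _ _ (by simp [hdl])]
  simp [List.reverse_append]

-- ===== VERDICT (by name: the statement is the Claim_ definition above) =====
theorem adding_spec : Claim_equal_adding := by
  intro x y _ hpre
  unfold Spec_adding adding adding_alt
  unfold Pre_adding at hpre
  by_cases h : y.length > x.length <;>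
    simp only [h, if_true, if_false, Bool.and_eq_true] at hpre ⊢
  · have hlen : (x.toList).length ≤ (y.toList).length := by
      have := h; simp only [String.length] at this ⊢; omega
    exact core y.toList x.toList hlen hpre.1 hpre.2
  · have hlen : (y.toList).length ≤ (x.toList).length := by
      have := h; simp only [String.length] at this ⊢; omega
    exact core x.toList y.toList hlen hpre.1 hpre.2
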